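-- pv_equiv track=rewrite | github.com/Agiwar/CodingPractice | Python/InterviewQuery/IQ_append_frequency.py | inject_frequency
-- ===== SOURCE A (Python) =====
-- from typing import List
--
-- def inject_frequency(sentence: str, discard_list: List[str]) -> str:
--     # time = O(n^2)
--     # space = O(n)
--     if not sentence: return ""
--
--     char_occur_str = ""
--     for char in sentence:
--         if char != " " and char not in discard_list:
--             char_occur = str(sentence.count(char))
--             char_occur_str += f"{char}{char_occur}"
--
--         else:
--             char_occur_str += char
--
--     return char_occur_str
-- ===== SOURCE B (Python) =====
-- def inject_frequency(sentence, discard_list):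
--     counts = {}
--     for ch in sentence:
--         counts[ch] = counts.get(ch, 0) + 1
--     discard = set(discard_list)
--     table = {ord(c): f"{c}{n}" for c, n in counts.items()
--              if c != " " and c not in discard}
--     return sentence.translate(table)
-- ===== Notes on version B (the rewrite author's own statement) =====
-- stated objective: faster
-- what changed: Instead of rescanning the whole sentence with sentence.count for every character and branching per output char, B counts all characters in one pass into a dict, builds a translation table once per distinct kept character, and emits the result with a single str.translate call.
import Mathlib
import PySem

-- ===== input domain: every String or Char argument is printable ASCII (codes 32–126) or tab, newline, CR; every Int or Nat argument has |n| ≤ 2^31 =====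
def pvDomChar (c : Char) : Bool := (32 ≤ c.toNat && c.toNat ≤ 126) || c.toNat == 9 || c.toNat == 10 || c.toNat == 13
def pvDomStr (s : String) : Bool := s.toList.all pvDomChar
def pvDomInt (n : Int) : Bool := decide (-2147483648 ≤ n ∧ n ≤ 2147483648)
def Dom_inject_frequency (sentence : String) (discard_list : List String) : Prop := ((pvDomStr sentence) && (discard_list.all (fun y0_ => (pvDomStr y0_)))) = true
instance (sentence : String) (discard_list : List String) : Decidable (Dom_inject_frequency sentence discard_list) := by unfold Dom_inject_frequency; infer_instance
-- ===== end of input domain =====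

-- B replaces A's per-character rescan of the sentence (sentence.count inside the loop) by one
-- counting pass into a dict plus a translation table over the distinct kept characters.


-- ===== PORT A =====
-- literal transliteration of A: early return on empty; one loop appending either
-- "<char><count>" (count rescanned from the whole sentence) or the char itself
def inject_frequency (sentence : String) (discard_list : List String) : String :=
  if sentence = "" then ""
  else
    String.mk (sentence.toList.foldl (fun char_occur_str char =>
      if char ≠ ' ' ∧ String.singleton char ∉ discard_list then
        char_occur_str ++ (char :: PySem.Int.toChars (PySem.Str.count sentence (String.singleton char) : Int))
      else
        char_occur_str ++ [char]) [])

-- ===== PORT B =====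
-- literal transliteration of B: count all chars once into a dict, build the translation
-- table for the distinct kept chars, then map every char through the table
def inject_frequency_alt (sentence : String) (discard_list : List String) : String :=
  let counts : PySem.Dict Char Int :=
    sentence.toList.foldl (fun d ch => d.insert ch (d.getD ch 0 + 1)) PySem.Dict.empty
  let discard := PySem.Set.ofList discard_list
  let table : PySem.Dict Char (List Char) :=
    (counts.items.filter (fun p => decide (p.1 ≠ ' ' ∧ String.singleton p.1 ∉ discard))).foldl
      (fun d p => d.insert p.1 (p.1 :: PySem.Int.toChars p.2)) PySem.Dict.empty
  String.mk ((sentence.toList.map (fun c => table.getD c [c])).flatten)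

-- ===== PRECONDITION & SPEC =====
def Spec_inject_frequency (sentence : String) (discard_list : List String) (out : String) : Prop := out = inject_frequency_alt sentence discard_list
instance (sentence : String) (discard_list : List String) (out : String) : Decidable (Spec_inject_frequency sentence discard_list out) := by unfold Spec_inject_frequency; infer_instance

-- ===== CLAIM (what is proved, stated in full; the proofs are below) =====
def Claim_equal_inject_frequency : Prop := ∀ (sentence : String) (discard_list : List String), Dom_inject_frequency sentence discard_list → Spec_inject_frequency sentence discard_list (inject_frequency sentence discard_list)

-- ===== LEMMAS AND PROOFS =====

-- Python's s.count(c) for a single character c is the plain character count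
lemma count_go_single (c : Char) : ∀ (fuel : Nat) (l : List Char) (acc : Nat),
    l.length ≤ fuel → PySem.Chars.count.go [c] fuel l acc = acc + l.count c := by
  intro fuel
  induction fuel with
  | zero => intro l acc h; cases l with
    | nil => simp [PySem.Chars.count.go]
    | cons x t => simp at h
  | succ n ih =>
    intro l acc h
    cases l with
    | nil => simp [PySem.Chars.count.go]
    | cons x t =>
      by_cases hx : x = c
      · subst hx
        simp [PySem.Chars.count.go, List.isPrefixOf, ih t (acc+1) (by simpa using h)]
        omega
      · have hpre : [c].isPrefixOf (x :: t) = false := by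
          simp [List.isPrefixOf]
          intro h'; exact absurd h'.symm hx
        simp [PySem.Chars.count.go, hpre, ih t acc (by simpa using h), hx]

lemma count_single (s : List Char) (c : Char) :
    PySem.Chars.count s [c] = s.count c := by
  simp [PySem.Chars.count, count_go_single c s.length s 0 (le_refl _)]

-- a key absent from the inserted list is looked up in the starting dict
lemma getD_fold_not_mem (f : Char × Int → List Char) (l : List (Char × Int))
    (d : PySem.Dict Char (List Char)) (c : Char) (dflt : List Char)
    (h : c ∉ l.map Prod.fst) :
    (l.foldl (fun d p => d.insert p.1 (f p)) d).getD c dflt = d.getD c dflt := by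
  induction l generalizing d with
  | nil => rfl
  | cons p t ih =>
    rw [List.map_cons] at h
    have h1 : ¬ c = p.1 := fun e => h (e ▸ List.mem_cons_self ..)
    have h2 : c ∉ t.map Prod.fst := fun m => h (List.mem_cons_of_mem _ m)
    rw [List.foldl_cons, ih _ h2, PySem.Dict.getD_insert, if_neg h1]

-- a key present in a distinct-keys inserted list gets its inserted value
lemma getD_fold_mem (f : Char × Int → List Char) (l : List (Char × Int))
    (c : Char) (v : Int) (dflt : List Char)
    (hnd : (l.map Prod.fst).Nodup) (hm : (c, v) ∈ l) (d : PySem.Dict Char (List Char)) :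
    (l.foldl (fun d p => d.insert p.1 (f p)) d).getD c dflt = f (c, v) := by
  induction l generalizing d with
  | nil => cases hm
  | cons p t ih =>
    rw [List.map_cons, List.nodup_cons] at hnd
    rw [List.foldl_cons]
    rcases List.mem_cons.mp hm with rfl | hm'
    · rw [getD_fold_not_mem f t _ c dflt (by simpa using hnd.1)]
      rw [PySem.Dict.getD_insert, if_pos rfl]
    · exact ih hnd.2 hm' _

-- the per-character output piece both programs produce
lemma table_getD (sentence : String) (discard_list : List String) (c : Char)
    (hc : c ∈ sentence.toList) :
    (((sentence.toList.foldl (fun d ch => d.insert ch (d.getD ch 0 + 1))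
        (PySem.Dict.empty : PySem.Dict Char Int)).items.filter
          (fun p => decide (p.1 ≠ ' ' ∧ String.singleton p.1 ∉ PySem.Set.ofList discard_list))).foldl
      (fun d p => d.insert p.1 (p.1 :: PySem.Int.toChars p.2)) PySem.Dict.empty).getD c [c]
    = if c ≠ ' ' ∧ String.singleton c ∉ discard_list then
        c :: PySem.Int.toChars ((sentence.toList.count c : Nat) : Int)
      else [c] := by
  rw [PySem.Dict.foldl_insert_getD_add_one_eq_counter, PySem.Dict.items_counter]
  set s := sentence.toList with hs
  set pred : Char × Int → Bool :=
    fun p => decide (p.1 ≠ ' ' ∧ String.singleton p.1 ∉ PySem.Set.ofList discard_list) with hpred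
  set l := ((PySem.Set.ofList s).map (fun k => (k, (s.count k : Int)))).filter pred with hl
  have hnd : (l.map Prod.fst).Nodup := by
    have hsub : (l.map Prod.fst).Sublist
        (((PySem.Set.ofList s).map (fun k => (k, (s.count k : Int)))).map Prod.fst) :=
      List.Sublist.map Prod.fst List.filter_sublist
    have hbig : (((PySem.Set.ofList s).map (fun k => (k, (s.count k : Int)))).map Prod.fst).Nodup := by
      rw [List.map_map]
      have hid : (Prod.fst ∘ fun k : Char => (k, (s.count k : Int))) = id := rfl
      rw [hid, List.map_id]
      exact PySem.Set.nodup_ofList s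
    exact hbig.sublist hsub
  by_cases hP : c ≠ ' ' ∧ String.singleton c ∉ discard_list
  · rw [if_pos hP]
    have hmem : (c, (s.count c : Int)) ∈ l := by
      rw [hl, List.mem_filter]
      constructor
      · exact List.mem_map_of_mem ((PySem.Set.mem_ofList s c).mpr hc)
      · simpa [hpred, PySem.Set.mem_ofList] using hP
    simpa using getD_fold_mem (fun p => p.1 :: PySem.Int.toChars p.2) l c _ [c] hnd hmem _
  · rw [if_neg hP]
    have hnmem : c ∉ l.map Prod.fst := by
      intro hm
      rcases List.mem_map.mp hm with ⟨p, hp, hpc⟩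
      rw [hl, List.mem_filter] at hp
      apply hP
      have := of_decide_eq_true hp.2
      simpa [hpc, PySem.Set.mem_ofList] using this
    rw [getD_fold_not_mem _ l _ c [c] hnmem]
    rfl

-- ===== VERDICT (by name: the statement is the Claim_ definition above) =====
theorem inject_frequency_spec : Claim_equal_inject_frequency := by
  intro sentence discard_list _
  unfold Spec_inject_frequency inject_frequency inject_frequency_alt
  by_cases hs : sentence = ""
  · subst hs; rfl
  · rw [if_neg hs]
    -- turn A's loop into a flatMap of per-character chunks
    have hfun : (fun (acc : List Char) (char : Char) =>
        if char ≠ ' ' ∧ String.singleton char ∉ discard_list then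
          acc ++ (char :: PySem.Int.toChars (PySem.Str.count sentence (String.singleton char) : Int))
        else acc ++ [char])
        = fun acc char => acc ++
          (if char ≠ ' ' ∧ String.singleton char ∉ discard_list then
            char :: PySem.Int.toChars (PySem.Str.count sentence (String.singleton char) : Int)
          else [char]) := by
      funext acc char; split <;> rfl
    rw [hfun, PySem.List.foldl_append_eq_flatMap, List.nil_append, List.flatMap_def]
    congr 1
    congr 1
    apply List.map_congr_left
    intro c hc
    rw [table_getD sentence discard_list c hc]
    have hcnt : PySem.Str.count sentence (String.singleton c) = sentence.toList.count c := by
      rw [PySem.Str.count_eq]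
      simpa using count_single sentence.toList c
    rw [hcnt]
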